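-- pv_equiv track=rewrite | github.com/scoutwer/prg-basics | 04-Functions/7-18.py | f
-- ===== SOURCE A (Python) =====
-- def f(num):
--     list = {}
--     result = 0
--     for j in str(num):
--         if j in list:
--             list[j] += 1
--         else:
--             list[j] = 1
--
--     for k, i in list.items():
--         if i > 1:
--             result = result + i * int(list[k])
--     return result
-- ===== SOURCE B (Python) =====
-- def f(num):
--     s = sorted(str(num))
--
--     def go(t):
--         if not t:
--             return 0
--         c = t[0]
--         run = 1
--         k = 1
--         while k < len(t) and t[k] == c:
--             run += 1
--             k += 1
--         return (run * run if run > 1 else 0) + go(t[k:])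
--
--     return go(s)
-- ===== Notes on version B (the rewrite author's own statement) =====
-- stated objective: alternative
-- what changed: Replaced A's dict-based character-frequency count followed by an items pass with sorting the characters of str(num) and scanning runs of equal characters, adding run_length^2 for each run longer than 1.
import Mathlib
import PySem

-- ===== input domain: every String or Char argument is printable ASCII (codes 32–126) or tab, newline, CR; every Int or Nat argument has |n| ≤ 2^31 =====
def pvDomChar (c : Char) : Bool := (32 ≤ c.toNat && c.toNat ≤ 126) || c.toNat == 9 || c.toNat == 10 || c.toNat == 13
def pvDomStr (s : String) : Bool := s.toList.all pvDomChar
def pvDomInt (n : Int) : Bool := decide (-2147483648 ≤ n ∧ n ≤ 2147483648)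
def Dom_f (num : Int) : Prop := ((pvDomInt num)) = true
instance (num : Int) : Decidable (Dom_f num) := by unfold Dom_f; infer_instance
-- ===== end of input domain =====

-- B replaces A's dict-frequency pass by sorting str(num) and scanning runs of equal characters (objective: alternative strategy, similar cost).

-- ===== PORT A =====
-- A: count each character of str(num) in a dict, then sum i*i over entries with i > 1.
def f (num : Int) : Int :=
  let d := (PySem.Int.toChars num).foldl
    (fun d j => if d.contains j then d.insert j (d.getD j 0 + 1) else d.insert j 1)
    PySem.Dict.empty
  -- 'result + i * int(list[k])': k comes from d.items, so the d[k] lookup always succeeds;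
  -- getD 0 is therefore exact here (the 0 default is never taken).
  d.items.foldl (fun result p => if p.2 > 1 then result + p.2 * d.getD p.1 0 else result) 0

-- ===== PORT B =====
-- 'go' of Source B: measure one run of the head character (the inner while loop is the
-- takeWhile over the tail), add its squared length if > 1, recurse on the rest.
def fAltRun : List Char → Int
  | [] => 0
  | c :: t =>
    let run : Int := 1 + (t.takeWhile (· == c)).length
    (if run > 1 then run * run else 0) + fAltRun (t.dropWhile (· == c))
  termination_by l => l.length
  decreasing_by
    simpa using Nat.lt_succ_of_le (List.length_dropWhile_le (· == c) t)

def f_alt (num : Int) : Int :=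
  fAltRun (PySem.List.sorted (PySem.Int.toChars num) (fun x => x))

-- ===== PRECONDITION & SPEC =====
def Spec_f (num : Int) (out : Int) : Prop := out = f_alt num
instance (num : Int) (out : Int) : Decidable (Spec_f num out) := by unfold Spec_f; infer_instance

-- ===== CLAIM (what is proved, stated in full; the proofs are below) =====
def Claim_equal_f : Prop := ∀ (num : Int), Dom_f num → Spec_f num (f num)

-- ===== LEMMAS AND PROOFS =====

-- contribution of one character occurring n times
def pvG (n : Int) : Int := if n > 1 then n * n else 0

-- A's value is the sum of pvG(count) over the distinct characters of str(num).
theorem pv_f_eq_sum (num : Int) :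
    f num = ((PySem.Set.ofList (PySem.Int.toChars num)).map
      (fun k => pvG ((PySem.Int.toChars num).count k : Int))).sum := by
  unfold f
  set xs := PySem.Int.toChars num with hxs
  have hd : xs.foldl
      (fun d j => if d.contains j then d.insert j (d.getD j 0 + 1) else d.insert j 1)
      PySem.Dict.empty = PySem.Dict.counter xs := by
    rw [← PySem.Dict.foldl_insert_getD_add_one_eq_counter]
    congr 1
    funext d j
    by_cases h : d.contains j
    · simp [h]
    · rw [PySem.Dict.getD_of_not_contains d 0 (by simpa using h)]
      simp [h]
  simp only [hd]
  rw [PySem.Dict.items_counter]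
  have hfun : (fun (result : Int) (p : Char × Int) =>
        if p.2 > 1 then result + p.2 * (PySem.Dict.counter xs).getD p.1 0 else result)
      = fun result p => result + (if p.2 > 1 then p.2 * (PySem.Dict.counter xs).getD p.1 0 else 0) := by
    funext r p; split <;> simp
  rw [hfun, PySem.List.foldl_add]
  simp only [PySem.Dict.getD_counter, List.map_map, zero_add]
  refine congrArg List.sum (List.map_congr_left fun k _ => ?_)
  simp only [Function.comp, pvG]

-- B's run scan, on a ≤-sorted list, is the same sum of pvG(count) over distinct characters.
theorem pv_run_aux (n : Nat) : ∀ (ys : List Char), ys.length ≤ n → ys.Pairwise (· ≤ ·) →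
    fAltRun ys = ((PySem.Set.ofList ys).map (fun k => pvG ((ys.count k : Nat) : Int))).sum := by
  induction n with
  | zero =>
    intro ys hlen _
    have : ys = [] := List.eq_nil_of_length_eq_zero (Nat.le_zero.mp hlen)
    subst this
    simp [fAltRun, PySem.Set.ofList]
  | succ n ih =>
    intro ys hlen hpair
    match ys with
    | [] => simp [fAltRun, PySem.Set.ofList]
    | c :: t =>
      set tw := t.takeWhile (· == c) with htw
      set dw := t.dropWhile (· == c) with hdw
      have hsplit : tw ++ dw = t := List.takeWhile_append_dropWhile
      obtain ⟨hc, ht⟩ := List.pairwise_cons.mp hpair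
      have hdwpair : dw.Pairwise (· ≤ ·) := ht.sublist (List.dropWhile_sublist _)
      have htwc : ∀ x ∈ tw, x = c := fun x hx => by
        have := List.mem_takeWhile_imp hx; simpa using this
      have hcnot : c ∉ dw := by
        intro hmem
        obtain ⟨x0, r, hdwh⟩ : ∃ x0 r, dw = x0 :: r := by
          cases hh : dw with
          | nil => rw [hh] at hmem; simp at hmem
          | cons a b => exact ⟨a, b, rfl⟩
        have hx0 : (x0 == c) = false := by
          have h2 := List.head?_dropWhile_not (· == c) t
          rw [← hdw, hdwh] at h2
          simpa using h2
        have hx0ne : x0 ≠ c := by simpa using hx0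
        have hx0t : x0 ∈ t := by
          have hx : x0 ∈ dw := by rw [hdwh]; simp
          rw [hdw] at hx
          exact (List.dropWhile_sublist _).subset hx
        have hcx0 : c ≤ x0 := hc x0 hx0t
        rw [hdwh] at hmem
        rcases List.mem_cons.mp hmem with h | h
        · exact hx0ne h.symm
        · have hx0le : x0 ≤ c := (List.pairwise_cons.mp (hdwh ▸ hdwpair)).1 c h
          exact hx0ne (le_antisymm hx0le hcx0)
      have hctw : tw.count c = tw.length := List.count_eq_length.mpr (fun b hb => ((htwc b hb).symm ▸ rfl))
      have hcdw : dw.count c = 0 := List.count_eq_zero.mpr hcnot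
      have hcount_c : (c :: t).count c = 1 + tw.length := by
        rw [List.count_cons_self, ← hsplit, List.count_append, hctw, hcdw]
        omega
      have hcount_ne : ∀ k, k ≠ c → (c :: t).count k = dw.count k := by
        intro k hk
        have h0 : tw.count k = 0 := List.count_eq_zero.mpr (fun hkm => hk (htwc k hkm))
        rw [← hsplit]
        simp [List.count_append, h0, Ne.symm hk]
      have hdwlen : dw.length ≤ n := by
        have h1 : dw.length ≤ t.length := List.length_dropWhile_le _ _
        simp at hlen; omega
      have hih := ih dw hdwlen hdwpair
      have hnd2 : (c :: PySem.Set.ofList dw).Nodup := by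
        refine List.nodup_cons.mpr ⟨fun h => hcnot ?_, PySem.Set.nodup_ofList _⟩
        exact (PySem.Set.mem_ofList _ _).mp h
      have hperm : (PySem.Set.ofList (c :: t)).Perm (c :: PySem.Set.ofList dw) := by
        rw [List.perm_ext_iff_of_nodup (PySem.Set.nodup_ofList _) hnd2]
        intro a
        simp only [PySem.Set.mem_ofList, List.mem_cons]
        constructor
        · rintro (h | h)
          · exact Or.inl h
          · rw [← hsplit] at h
            rcases List.mem_append.mp h with h | h
            · exact Or.inl (htwc a h)
            · exact Or.inr h
        · rintro (h | h)
          · exact Or.inl h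
          · exact Or.inr (by rw [← hsplit]; exact List.mem_append_right _ h)
      calc fAltRun (c :: t)
          = pvG (((c :: t).count c : Nat) : Int) + fAltRun dw := by
            rw [fAltRun, hcount_c]
            simp only [← htw, ← hdw, pvG]
            push_cast
            ring_nf
        _ = pvG (((c :: t).count c : Nat) : Int)
            + ((PySem.Set.ofList dw).map (fun k => pvG ((dw.count k : Nat) : Int))).sum := by rw [hih]
        _ = ((c :: PySem.Set.ofList dw).map (fun k => pvG (((c :: t).count k : Nat) : Int))).sum := by
            rw [List.map_cons, List.sum_cons]
            congr 1
            refine congrArg List.sum (List.map_congr_left fun k hk => ?_)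
            have hkdw : k ∈ dw := (PySem.Set.mem_ofList _ _).mp hk
            have hkc : k ≠ c := fun h => hcnot (h ▸ hkdw)
            rw [hcount_ne k hkc]
        _ = ((PySem.Set.ofList (c :: t)).map (fun k => pvG (((c :: t).count k : Nat) : Int))).sum :=
            ((hperm.map _).sum_eq).symm

-- ===== VERDICT (by name: the statement is the Claim_ definition above) =====
theorem f_spec : Claim_equal_f := by
  intro num _
  unfold Spec_f f_alt
  rw [pv_f_eq_sum]
  set xs := PySem.Int.toChars num with hxs
  set ss := PySem.List.sorted xs (fun x => x) with hss
  have hperm : ss.Perm xs := PySem.List.sorted_perm xs (fun x => x) false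
  rw [pv_run_aux ss.length ss le_rfl
    (by simpa using PySem.List.sorted_pairwise xs (fun x => x))]
  have hcnt : ∀ k, ss.count k = xs.count k := fun k => hperm.count_eq k
  have hp : (PySem.Set.ofList xs).Perm (PySem.Set.ofList ss) := by
    rw [List.perm_ext_iff_of_nodup (PySem.Set.nodup_ofList _) (PySem.Set.nodup_ofList _)]
    intro a
    simp [PySem.Set.mem_ofList, hperm.mem_iff]
  calc ((PySem.Set.ofList xs).map (fun k => pvG (xs.count k : Int))).sum
      = ((PySem.Set.ofList ss).map (fun k => pvG (xs.count k : Int))).sum :=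
        (hp.map _).sum_eq
    _ = ((PySem.Set.ofList ss).map (fun k => pvG (ss.count k : Int))).sum := by
        simp [hcnt]
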